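-- pv_equiv track=rewrite | github.com/PrimaSanghvi/SupplyIQCogniify | backend/explainer.py | _get_biggest_surplus
-- ===== SOURCE A (Python) =====
-- from typing import Optional, List
--
-- def _get_biggest_surplus(dc_lookup: dict) -> Optional[dict]:
--     """Find DC with the biggest surplus."""
--     surplus_dcs = [v for v in dc_lookup.values() if v["surplus"] > 0]
--     if not surplus_dcs:
--         return None
--     seen = set()
--     unique = []
--     for dc in surplus_dcs:
--         if dc["id"] not in seen:
--             seen.add(dc["id"])
--             unique.append(dc)
--     return max(unique, key=lambda x: x["surplus"])
-- ===== SOURCE B (Python) =====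
-- from typing import Optional
--
-- def _get_biggest_surplus(dc_lookup: dict) -> Optional[dict]:
--     """Find DC with the biggest surplus: index first positive occurrence per id
--     in a dict, then select the winner as the head of a sort by descending surplus."""
--     firsts = {}
--     for v in dc_lookup.values():
--         if v["surplus"] > 0:
--             firsts.setdefault(v["id"], v)
--     if not firsts:
--         return None
--     return sorted(firsts.values(), key=lambda v: -v["surplus"])[0]
-- ===== Notes on version B (the rewrite author's own statement) =====
-- stated objective: alternative
-- what changed: Dedups by keeping the first positive occurrence per id in a dict keyed by id (one setdefault loop) instead of A's filter comprehension plus seen-set/unique-list loop, and selects the winner as element 0 of a stable sort by descending surplus instead of a max scan.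
import Mathlib
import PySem

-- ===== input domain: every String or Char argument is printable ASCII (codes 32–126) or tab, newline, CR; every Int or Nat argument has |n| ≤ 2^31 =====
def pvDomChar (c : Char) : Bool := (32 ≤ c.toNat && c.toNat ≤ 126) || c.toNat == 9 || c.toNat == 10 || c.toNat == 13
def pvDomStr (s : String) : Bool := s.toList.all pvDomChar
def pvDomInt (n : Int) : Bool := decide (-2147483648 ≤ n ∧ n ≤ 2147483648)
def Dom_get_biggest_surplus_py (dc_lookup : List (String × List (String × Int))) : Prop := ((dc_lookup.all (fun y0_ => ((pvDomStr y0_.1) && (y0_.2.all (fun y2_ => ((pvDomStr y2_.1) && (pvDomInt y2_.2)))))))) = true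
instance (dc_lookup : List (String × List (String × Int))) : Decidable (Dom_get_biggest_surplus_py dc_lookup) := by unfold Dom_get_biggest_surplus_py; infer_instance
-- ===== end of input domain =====

-- B dedups via a dict keyed by id (setdefault) built in one loop and picks the winner as element 0
-- of a sort by descending surplus, instead of A's filter list + seen-set dedup loop + max scan.

-- ===== PORT A =====
-- the loop body of A's dedup-by-id loop (seen : set, unique : list)
def pvAStep (st : PySem.Set Int × List (PySem.Dict String Int)) (dc : PySem.Dict String Int) :
    PySem.Set Int × List (PySem.Dict String Int) :=
  if st.1.contains (dc.getD "id" 0) then st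
  else (st.1.add (dc.getD "id" 0), st.2 ++ [dc])

def get_biggest_surplus_py (dc_lookup : List (String × List (String × Int))) : Option (List (String × Int)) :=
  let vs := ((PySem.Dict.ofList dc_lookup).values).map (fun v => PySem.Dict.ofList v)
  let surplus_dcs := vs.filter (fun v => decide (0 < v.getD "surplus" 0))
  if surplus_dcs.isEmpty then none
  else
    let su := surplus_dcs.foldl pvAStep (PySem.Set.empty, [])
    (PySem.List.max? su.2 (fun x => x.getD "surplus" 0)).map (fun v => v.items)

-- ===== PORT B =====
-- the loop body of B's dict-building loop: firsts.setdefault(v["id"], v) for positive surplus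
def pvBStep (d : PySem.Dict Int (PySem.Dict String Int)) (v0 : List (String × Int)) :
    PySem.Dict Int (PySem.Dict String Int) :=
  let v := PySem.Dict.ofList v0
  if 0 < v.getD "surplus" 0 then d.setdefault (v.getD "id" 0) v else d

def get_biggest_surplus_py_alt (dc_lookup : List (String × List (String × Int))) : Option (List (String × Int)) :=
  let firsts := ((PySem.Dict.ofList dc_lookup).values).foldl pvBStep PySem.Dict.empty
  if firsts.items.isEmpty then none
  else
    (PySem.List.sorted firsts.values (fun v => -(v.getD "surplus" 0))).head?.map (fun v => v.items)

-- ===== PRECONDITION & SPEC =====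
-- Pre_ excludes exactly the inputs on which the Python raises KeyError: a value dict
-- without a "surplus" key, or one with positive surplus but no "id" key.
def Pre_get_biggest_surplus_py (dc_lookup : List (String × List (String × Int))) : Prop :=
  ∀ v ∈ (PySem.Dict.ofList dc_lookup).values,
    (PySem.Dict.ofList v).contains "surplus" = true ∧
    (0 < (PySem.Dict.ofList v).getD "surplus" 0 → (PySem.Dict.ofList v).contains "id" = true)
instance (dc_lookup : List (String × List (String × Int))) : Decidable (Pre_get_biggest_surplus_py dc_lookup) := by unfold Pre_get_biggest_surplus_py; infer_instance

def pvWitness_get_biggest_surplus_py : (List (String × List (String × Int))) :=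
  [("a", [("id", 1), ("surplus", 5)]), ("b", [("id", 2), ("surplus", 3)])]

def Spec_get_biggest_surplus_py (dc_lookup : List (String × List (String × Int))) (out : Option (List (String × Int))) : Prop := out = get_biggest_surplus_py_alt dc_lookup
instance (dc_lookup : List (String × List (String × Int))) (out : Option (List (String × Int))) : Decidable (Spec_get_biggest_surplus_py dc_lookup out) := by unfold Spec_get_biggest_surplus_py; infer_instance

-- ===== CLAIM (what is proved, stated in full; the proofs are below) =====
def Claim_equal_get_biggest_surplus_py : Prop := ∀ (dc_lookup : List (String × List (String × Int))), Dom_get_biggest_surplus_py dc_lookup → Pre_get_biggest_surplus_py dc_lookup → Spec_get_biggest_surplus_py dc_lookup (get_biggest_surplus_py dc_lookup)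

-- ===== LEMMAS AND PROOFS =====

-- the dedup-by-id of a list, as a structural recursion (proof-side view of A's loop)
def pvDLoop : List (PySem.Dict String Int) → PySem.Set Int → List (PySem.Dict String Int)
  | [], _ => []
  | v :: t, s =>
    if s.contains (v.getD "id" 0) then pvDLoop t s
    else v :: pvDLoop t (s.add (v.getD "id" 0))

-- A's dedup loop builds exactly pvDLoop
lemma aloop_eq_pvDLoop (L : List (PySem.Dict String Int)) (s : PySem.Set Int)
    (u : List (PySem.Dict String Int)) :
    (L.foldl pvAStep (s, u)).2 = u ++ pvDLoop L s := by
  induction L generalizing s u with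
  | nil => simp [pvDLoop]
  | cons v t ih =>
    simp only [List.foldl_cons, pvAStep, pvDLoop]
    by_cases h : v.getD "id" 0 ∈ s
    · simp [h, ih]
    · simp [h, ih]

-- B's dict loop lists, in value position, exactly the dedup of the filtered values
lemma bdict_values (L : List (List (String × Int))) (d : PySem.Dict Int (PySem.Dict String Int))
    (s : PySem.Set Int) (hks : ∀ k, d.contains k = s.contains k) :
    (L.foldl pvBStep d).values =
      d.values ++ pvDLoop ((L.map (fun v => PySem.Dict.ofList v)).filter
          (fun v => decide (0 < v.getD "surplus" 0))) s := by
  induction L generalizing d s with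
  | nil => simp [pvDLoop]
  | cons v0 t ih =>
    simp only [List.foldl_cons, pvBStep, List.map_cons, List.filter_cons]
    by_cases hp : (0 : Int) < (PySem.Dict.ofList v0).getD "surplus" 0
    · simp only [decide_eq_true_eq, hp, if_true]
      by_cases hc : d.contains ((PySem.Dict.ofList v0).getD "id" 0) = true
      · have hs : PySem.Set.contains s ((PySem.Dict.ofList v0).getD "id" 0) = true := by
          rw [← hks]; exact hc
        have hmem : (PySem.Dict.ofList v0).getD "id" 0 ∈ s := List.contains_iff_mem.mp hs
        rw [show d.setdefault ((PySem.Dict.ofList v0).getD "id" 0) (PySem.Dict.ofList v0) = d by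
          simp [PySem.Dict.setdefault, hc]]
        rw [ih d s hks]
        simp [pvDLoop, hmem]
      · have hcf : d.contains ((PySem.Dict.ofList v0).getD "id" 0) = false := by
          simpa using hc
        have hs : PySem.Set.contains s ((PySem.Dict.ofList v0).getD "id" 0) = false := by
          rw [← hks]; exact hcf
        have hnot : (PySem.Dict.ofList v0).getD "id" 0 ∉ s := by
          intro h
          have : PySem.Set.contains s ((PySem.Dict.ofList v0).getD "id" 0) = true :=
            List.contains_iff_mem.mpr h
          rw [this] at hs
          exact Bool.true_eq_false.mp hs
        rw [show d.setdefault ((PySem.Dict.ofList v0).getD "id" 0) (PySem.Dict.ofList v0) =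
            PySem.Dict.mk (d.items ++ [((PySem.Dict.ofList v0).getD "id" 0, PySem.Dict.ofList v0)]) by
          simp [PySem.Dict.setdefault, hcf]]
        rw [ih _ (s.add ((PySem.Dict.ofList v0).getD "id" 0)) (by
          intro k
          have h1 := hks k
          simp only [PySem.Dict.contains, PySem.Set.add] at h1 ⊢
          rw [hs]
          simp only [Bool.false_eq_true, if_false, List.any_append, h1,
            PySem.Set.contains, List.contains_append]
          by_cases hk : k = (PySem.Dict.ofList v0).getD "id" 0
          · simp [hk]
          · simp [hk, beq_eq_false_iff_ne.mpr (Ne.symm hk)])]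
        simp [pvDLoop, hnot, PySem.Dict.values]
    · simp only [decide_eq_true_eq, hp, if_false]
      rw [ih d s hks]

-- head of the foldl-insertBy (insertion sort by descending f) is the running first-max of f
lemma head_foldl_insertBy (f : PySem.Dict String Int → Int) :
    ∀ (L acc : List (PySem.Dict String Int)),
    (L.foldl (fun a x =>
        PySem.List.insertBy (fun a b => decide ((-(f a) : Int) < -(f b))) x a) acc).head? =
      (match acc.head? with
       | none => PySem.List.max? L f
       | some m => PySem.List.max? (m :: L) f) := by
  intro L
  induction L with
  | nil => intro acc; cases acc <;> rfl
  | cons x t ih =>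
    intro acc
    simp only [List.foldl_cons]
    rw [ih]
    cases acc with
    | nil => rfl
    | cons y ys =>
      simp only [PySem.List.insertBy, List.head?]
      by_cases h : f y < f x
      · rw [if_pos (by simpa using h)]
        show PySem.List.max? (x :: t) f = PySem.List.max? (y :: x :: t) f
        simp [PySem.List.max?, h]
      · rw [if_neg (by simpa using h)]
        show PySem.List.max? (y :: t) f = PySem.List.max? (y :: x :: t) f
        simp [PySem.List.max?, h]

-- head of the stable sort by descending key = Python max (first maximal element)
lemma head_sorted_neg_eq_max? (L : List (PySem.Dict String Int)) (f : PySem.Dict String Int → Int) :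
    (PySem.List.sorted L (fun v => -(f v))).head? = PySem.List.max? L f := by
  have h := head_foldl_insertBy f L []
  rw [PySem.List.sorted_eq_foldl_insertBy]
  simpa using h

-- ===== VERDICT (by name: the statement is the Claim_ definition above) =====
theorem get_biggest_surplus_py_spec : Claim_equal_get_biggest_surplus_py := by
  intro dc_lookup _ _
  unfold Spec_get_biggest_surplus_py get_biggest_surplus_py get_biggest_surplus_py_alt
  simp only []
  have hb := bdict_values ((PySem.Dict.ofList dc_lookup).values) PySem.Dict.empty
    PySem.Set.empty (fun _ => rfl)
  set F := ((PySem.Dict.ofList dc_lookup).values.map (fun v => PySem.Dict.ofList v)).filter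
      (fun v => decide (0 < v.getD "surplus" 0)) with hF
  set W := List.foldl pvBStep PySem.Dict.empty ((PySem.Dict.ofList dc_lookup).values) with hW
  have hval : W.values = pvDLoop F PySem.Set.empty := by
    rw [hb]; exact List.nil_append _
  by_cases hFe : F = []
  · have hval2 : W.values = [] := by rw [hval, hFe]; rfl
    have hitems : W.items = [] := List.map_eq_nil_iff.mp hval2
    rw [hFe]
    simp [hitems]
  · have hA : F.isEmpty = false := by simp [hFe]
    have hvne : pvDLoop F PySem.Set.empty ≠ [] := by
      rcases F with _ | ⟨v, rest⟩
      · exact absurd rfl hFe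
      · rw [show pvDLoop (v :: rest) PySem.Set.empty
            = v :: pvDLoop rest (PySem.Set.add PySem.Set.empty (v.getD "id" 0)) from rfl]
        exact List.cons_ne_nil _ _
    have hitems : W.items.isEmpty = false := by
      rcases h : W.items with _ | _
      · exact absurd (by rw [← hval]; show List.map _ W.items = []; rw [h]; rfl) hvne
      · rfl
    rw [hA, hitems]
    simp only [Bool.false_eq_true, if_false]
    rw [hval, aloop_eq_pvDLoop, List.nil_append, head_sorted_neg_eq_max?]
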